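-- pv_equiv track=rewrite | github.com/Lukingisi94/Dietech | main.py | auto_renal_servings
-- ===== SOURCE A (Python) =====
-- RENAL_FOOD_GROUPS = [
--     {"name": "milk", "carb": 12, "protein": 8, "fat": 5, "k": 150, "na": 120, "po4": 90, "cal": 120},
--     {"name": "veg_low_k", "carb": 2, "protein": 1, "fat": 0, "k": 70, "na": 10, "po4": 15, "cal": 15},
--     {"name": "veg_mod_k", "carb": 2, "protein": 1, "fat": 0, "k": 150, "na": 10, "po4": 20, "cal": 15},
--     {"name": "veg_high_k", "carb": 2, "protein": 1, "fat": 0, "k": 270, "na": 10, "po4": 25, "cal": 15},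
--     {"name": "fruit_low_k", "carb": 10, "protein": 0, "fat": 0, "k": 80, "na": 2, "po4": 10, "cal": 40},
--     {"name": "fruit_mod_k", "carb": 10, "protein": 0, "fat": 0, "k": 150, "na": 2, "po4": 15, "cal": 40},
--     {"name": "fruit_high_k", "carb": 10, "protein": 0, "fat": 0, "k": 250, "na": 2, "po4": 20, "cal": 40},
--     {"name": "legumes", "carb": 15, "protein": 7, "fat": 6, "k": 200, "na": 5, "po4": 60, "cal": 90},
--     {"name": "sugar", "carb": 5, "protein": 0, "fat": 0, "k": 0, "na": 0, "po4": 0, "cal": 20},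
--     {"name": "drinks", "carb": 10, "protein": 0, "fat": 0, "k": 10, "na": 5, "po4": 0, "cal": 40},
--     {"name": "starch_low_k", "carb": 15, "protein": 3, "fat": 0, "k": 30, "na": 5, "po4": 20, "cal": 70},
--     {"name": "starch_high_k", "carb": 15, "protein": 3, "fat": 0, "k": 120, "na": 5, "po4": 40, "cal": 70},
--     {"name": "starch_low_po4", "carb": 15, "protein": 3, "fat": 0, "k": 30, "na": 5, "po4": 10, "cal": 70},
--     {"name": "starch_high_po4", "carb": 15, "protein": 3, "fat": 0, "k": 30, "na": 5, "po4": 60, "cal": 70},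
--     {"name": "protein_low_po4", "carb": 0, "protein": 7, "fat": 5, "k": 60, "na": 50, "po4": 65, "cal": 75},
--     {"name": "protein_high_po4", "carb": 0, "protein": 7, "fat": 5, "k": 60, "na": 50, "po4": 120, "cal": 75},
--     {"name": "fats", "carb": 0, "protein": 0, "fat": 5, "k": 0, "na": 0, "po4": 0, "cal": 45},
-- ]
--
-- def auto_renal_servings(carbs_g, protein_g, fats_g, k_limit, po4_limit, na_limit):
--     # Simple greedy allocation: prioritize low K/PO4 groups, fill macros, don't exceed limits
--     servings = {g["name"]: 0 for g in RENAL_FOOD_GROUPS}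
--     macros = {"carb": carbs_g, "protein": protein_g, "fat": fats_g}
--     electrolytes = {"k": 0, "po4": 0, "na": 0}
--     # Try to fill macros with lowest K/PO4 groups first
--     for g in RENAL_FOOD_GROUPS:
--         max_serv = 0
--         if g["carb"] > 0:
--             max_serv = min(macros["carb"] // g["carb"], 10)
--         elif g["protein"] > 0:
--             max_serv = min(macros["protein"] // g["protein"], 10)
--         elif g["fat"] > 0:
--             max_serv = min(macros["fat"] // g["fat"], 10)
--         max_serv = int(max_serv)
--         for _ in range(max_serv):
--             # Check if adding this serving would exceed any electrolyte limit
--             if (electrolytes["k"] + g["k"] > k_limit) or (electrolytes["po4"] + g["po4"] > po4_limit) or (electrolytes["na"] + g["na"] > na_limit):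
--                 break
--             servings[g["name"]] += 1
--             macros["carb"] -= g["carb"]
--             macros["protein"] -= g["protein"]
--             macros["fat"] -= g["fat"]
--             electrolytes["k"] += g["k"]
--             electrolytes["po4"] += g["po4"]
--             electrolytes["na"] += g["na"]
--     return servings, electrolytes
-- ===== SOURCE B (Python) =====
-- RENAL_FOOD_GROUPS = [
--     {"name": "milk", "carb": 12, "protein": 8, "fat": 5, "k": 150, "na": 120, "po4": 90, "cal": 120},
--     {"name": "veg_low_k", "carb": 2, "protein": 1, "fat": 0, "k": 70, "na": 10, "po4": 15, "cal": 15},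
--     {"name": "veg_mod_k", "carb": 2, "protein": 1, "fat": 0, "k": 150, "na": 10, "po4": 20, "cal": 15},
--     {"name": "veg_high_k", "carb": 2, "protein": 1, "fat": 0, "k": 270, "na": 10, "po4": 25, "cal": 15},
--     {"name": "fruit_low_k", "carb": 10, "protein": 0, "fat": 0, "k": 80, "na": 2, "po4": 10, "cal": 40},
--     {"name": "fruit_mod_k", "carb": 10, "protein": 0, "fat": 0, "k": 150, "na": 2, "po4": 15, "cal": 40},
--     {"name": "fruit_high_k", "carb": 10, "protein": 0, "fat": 0, "k": 250, "na": 2, "po4": 20, "cal": 40},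
--     {"name": "legumes", "carb": 15, "protein": 7, "fat": 6, "k": 200, "na": 5, "po4": 60, "cal": 90},
--     {"name": "sugar", "carb": 5, "protein": 0, "fat": 0, "k": 0, "na": 0, "po4": 0, "cal": 20},
--     {"name": "drinks", "carb": 10, "protein": 0, "fat": 0, "k": 10, "na": 5, "po4": 0, "cal": 40},
--     {"name": "starch_low_k", "carb": 15, "protein": 3, "fat": 0, "k": 30, "na": 5, "po4": 20, "cal": 70},
--     {"name": "starch_high_k", "carb": 15, "protein": 3, "fat": 0, "k": 120, "na": 5, "po4": 40, "cal": 70},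
--     {"name": "starch_low_po4", "carb": 15, "protein": 3, "fat": 0, "k": 30, "na": 5, "po4": 10, "cal": 70},
--     {"name": "starch_high_po4", "carb": 15, "protein": 3, "fat": 0, "k": 30, "na": 5, "po4": 60, "cal": 70},
--     {"name": "protein_low_po4", "carb": 0, "protein": 7, "fat": 5, "k": 60, "na": 50, "po4": 65, "cal": 75},
--     {"name": "protein_high_po4", "carb": 0, "protein": 7, "fat": 5, "k": 60, "na": 50, "po4": 120, "cal": 75},
--     {"name": "fats", "carb": 0, "protein": 0, "fat": 5, "k": 0, "na": 0, "po4": 0, "cal": 45},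
-- ]
--
-- def auto_renal_servings(carbs_g, protein_g, fats_g, k_limit, po4_limit, na_limit):
--     # Closed-form greedy: for each group compute the number of servings that fit
--     # in one arithmetic step instead of adding servings one by one.
--     servings = {}
--     carb, protein, fat = carbs_g, protein_g, fats_g
--     ek = ep = en = 0
--     for g in RENAL_FOOD_GROUPS:
--         if g["carb"] > 0:
--             n = min(carb // g["carb"], 10)
--         elif g["protein"] > 0:
--             n = min(protein // g["protein"], 10)
--         elif g["fat"] > 0:
--             n = min(fat // g["fat"], 10)
--         else:
--             n = 0
--         # A serving must fit every electrolyte budget; within that, take as many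
--         # servings as the headroom of each contributing electrolyte allows.
--         if ek + g["k"] <= k_limit and ep + g["po4"] <= po4_limit and en + g["na"] <= na_limit:
--             for coeff, used, limit in ((g["k"], ek, k_limit), (g["po4"], ep, po4_limit), (g["na"], en, na_limit)):
--                 if coeff > 0:
--                     n = min(n, (limit - used) // coeff)
--             n = max(n, 0)
--         else:
--             n = 0
--         servings[g["name"]] = n
--         carb -= n * g["carb"]
--         protein -= n * g["protein"]
--         fat -= n * g["fat"]
--         ek += n * g["k"]
--         ep += n * g["po4"]
--         en += n * g["na"]
--     return servings, {"k": ek, "po4": ep, "na": en}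
-- ===== Notes on version B (the rewrite author's own statement) =====
-- stated objective: simpler
-- what changed: B replaces A's per-serving inner loop (up to 10 iterations per group with an early break) by one closed-form step per group: if a single serving fits every electrolyte budget, the macro-based max_serv is clamped by the floor-divided headroom of each contributing electrolyte (and at 0), otherwise the group gets none; servings, macros and electrolytes are then updated in one bulk step, and the servings dict is emitted one entry per group instead of pre-initialized and incremented.
import Mathlib
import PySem

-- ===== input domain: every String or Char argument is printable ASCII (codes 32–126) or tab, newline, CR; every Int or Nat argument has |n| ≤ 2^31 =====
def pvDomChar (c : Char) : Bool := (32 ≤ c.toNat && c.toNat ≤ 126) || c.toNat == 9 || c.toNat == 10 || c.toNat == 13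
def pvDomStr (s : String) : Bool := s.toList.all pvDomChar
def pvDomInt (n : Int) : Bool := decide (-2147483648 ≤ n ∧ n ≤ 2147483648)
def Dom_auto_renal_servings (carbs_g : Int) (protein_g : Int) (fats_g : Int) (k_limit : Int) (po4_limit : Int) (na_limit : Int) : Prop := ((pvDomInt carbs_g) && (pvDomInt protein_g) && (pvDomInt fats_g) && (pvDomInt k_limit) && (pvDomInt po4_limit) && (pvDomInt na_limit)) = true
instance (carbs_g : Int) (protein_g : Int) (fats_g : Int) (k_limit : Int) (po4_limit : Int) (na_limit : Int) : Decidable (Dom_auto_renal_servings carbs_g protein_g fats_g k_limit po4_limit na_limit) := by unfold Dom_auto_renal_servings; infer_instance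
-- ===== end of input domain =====

-- B replaces A's serving-by-serving inner loop with one closed-form arithmetic step per
-- food group (objective: simpler); both Pythons return fresh dicts, no argument is mutated.

-- ===== PORT A =====
-- One food-group record of RENAL_FOOD_GROUPS (fields in the table's key order).
structure PvGroup where
  name : String
  carb : Int
  protein : Int
  fat : Int
  k : Int
  na : Int
  po4 : Int
  cal : Int
deriving Repr, DecidableEq

def pvGroups : List PvGroup :=
  [⟨"milk", 12, 8, 5, 150, 120, 90, 120⟩,
   ⟨"veg_low_k", 2, 1, 0, 70, 10, 15, 15⟩,
   ⟨"veg_mod_k", 2, 1, 0, 150, 10, 20, 15⟩,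
   ⟨"veg_high_k", 2, 1, 0, 270, 10, 25, 15⟩,
   ⟨"fruit_low_k", 10, 0, 0, 80, 2, 10, 40⟩,
   ⟨"fruit_mod_k", 10, 0, 0, 150, 2, 15, 40⟩,
   ⟨"fruit_high_k", 10, 0, 0, 250, 2, 20, 40⟩,
   ⟨"legumes", 15, 7, 6, 200, 5, 60, 90⟩,
   ⟨"sugar", 5, 0, 0, 0, 0, 0, 20⟩,
   ⟨"drinks", 10, 0, 0, 10, 5, 0, 40⟩,
   ⟨"starch_low_k", 15, 3, 0, 30, 5, 20, 70⟩,
   ⟨"starch_high_k", 15, 3, 0, 120, 5, 40, 70⟩,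
   ⟨"starch_low_po4", 15, 3, 0, 30, 5, 10, 70⟩,
   ⟨"starch_high_po4", 15, 3, 0, 30, 5, 60, 70⟩,
   ⟨"protein_low_po4", 0, 7, 5, 60, 50, 65, 75⟩,
   ⟨"protein_high_po4", 0, 7, 5, 60, 50, 120, 75⟩,
   ⟨"fats", 0, 0, 5, 0, 0, 0, 45⟩]

-- A's state: the servings dict, and the fixed-key dicts macros {"carb","protein","fat"} and
-- electrolytes {"k","po4","na"} carried as Int triples in that key order (the electrolytes
-- dict is rebuilt in its insertion order at return).
abbrev PvStA := PySem.Dict String Int × (Int × Int × Int) × (Int × Int × Int)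

-- A's inner `for _ in range(max_serv)` loop with its early `break`.
def pvInnerA (g : PvGroup) (kl pl nl : Int) : Nat → PvStA → PvStA
  | 0, st => st
  | Nat.succ m, (serv, (mc, mp, mf), (ek, ep, en)) =>
    if ek + g.k > kl ∨ ep + g.po4 > pl ∨ en + g.na > nl then (serv, (mc, mp, mf), (ek, ep, en))
    else pvInnerA g kl pl nl m
      (serv.insert g.name (serv.getD g.name 0 + 1),
       (mc - g.carb, mp - g.protein, mf - g.fat),
       (ek + g.k, ep + g.po4, en + g.na))

-- A's `max_serv` computation from the current macro remainders (byte-identical in Source B's n).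
def pvMaxServ (g : PvGroup) (mc mp mf : Int) : Int :=
  if g.carb > 0 then min (PySem.Int.floordiv mc g.carb) 10
  else if g.protein > 0 then min (PySem.Int.floordiv mp g.protein) 10
  else if g.fat > 0 then min (PySem.Int.floordiv mf g.fat) 10
  else 0

-- One iteration of A's outer `for g in RENAL_FOOD_GROUPS` loop.
def pvStepA (kl pl nl : Int) (st : PvStA) (g : PvGroup) : PvStA :=
  pvInnerA g kl pl nl (pvMaxServ g st.2.1.1 st.2.1.2.1 st.2.1.2.2).toNat st

-- `servings = {g["name"]: 0 for g in RENAL_FOOD_GROUPS}`, then the outer loop.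
def pvRunA (carbs_g protein_g fats_g k_limit po4_limit na_limit : Int) : PvStA :=
  pvGroups.foldl (pvStepA k_limit po4_limit na_limit)
    (pvGroups.foldl (fun d g => d.insert g.name 0) PySem.Dict.empty,
     (carbs_g, protein_g, fats_g), (0, 0, 0))

def auto_renal_servings (carbs_g : Int) (protein_g : Int) (fats_g : Int) (k_limit : Int) (po4_limit : Int) (na_limit : Int) : (List (String × Int)) × (List (String × Int)) :=
  ((pvRunA carbs_g protein_g fats_g k_limit po4_limit na_limit).1.items,
   [("k", (pvRunA carbs_g protein_g fats_g k_limit po4_limit na_limit).2.2.1),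
    ("po4", (pvRunA carbs_g protein_g fats_g k_limit po4_limit na_limit).2.2.2.1),
    ("na", (pvRunA carbs_g protein_g fats_g k_limit po4_limit na_limit).2.2.2.2)])

-- ===== PORT B =====
-- The body of Source B's small `for coeff, used, limit in (...)` loop over the three electrolytes:
-- clamp n by the headroom of a contributing electrolyte.
def pvCap (coeff lim used n : Int) : Int :=
  if coeff > 0 then min n (PySem.Int.floordiv (lim - used) coeff) else n

-- B's state: the servings association list built in order, the macro remainders, the electrolyte totals.
abbrev PvStB := List (String × Int) × (Int × Int × Int) × (Int × Int × Int)

-- Source B's serving count for one group: if a single serving fits every electrolyte budget,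
-- the macro-based count clamped by the three headrooms and at 0; otherwise 0.
def pvN (g : PvGroup) (kl pl nl mc mp mf ek ep en : Int) : Int :=
  if ek + g.k ≤ kl ∧ ep + g.po4 ≤ pl ∧ en + g.na ≤ nl then
    max (pvCap g.na nl en (pvCap g.po4 pl ep (pvCap g.k kl ek (pvMaxServ g mc mp mf)))) 0
  else 0

-- One iteration of Source B's loop: closed-form serving count n, then one bulk update.
def pvStepB (kl pl nl : Int) (st : PvStB) (g : PvGroup) : PvStB :=
  (st.1 ++ [(g.name, pvN g kl pl nl st.2.1.1 st.2.1.2.1 st.2.1.2.2 st.2.2.1 st.2.2.2.1 st.2.2.2.2)],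
   (st.2.1.1 - pvN g kl pl nl st.2.1.1 st.2.1.2.1 st.2.1.2.2 st.2.2.1 st.2.2.2.1 st.2.2.2.2 * g.carb,
    st.2.1.2.1 - pvN g kl pl nl st.2.1.1 st.2.1.2.1 st.2.1.2.2 st.2.2.1 st.2.2.2.1 st.2.2.2.2 * g.protein,
    st.2.1.2.2 - pvN g kl pl nl st.2.1.1 st.2.1.2.1 st.2.1.2.2 st.2.2.1 st.2.2.2.1 st.2.2.2.2 * g.fat),
   (st.2.2.1 + pvN g kl pl nl st.2.1.1 st.2.1.2.1 st.2.1.2.2 st.2.2.1 st.2.2.2.1 st.2.2.2.2 * g.k,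
    st.2.2.2.1 + pvN g kl pl nl st.2.1.1 st.2.1.2.1 st.2.1.2.2 st.2.2.1 st.2.2.2.1 st.2.2.2.2 * g.po4,
    st.2.2.2.2 + pvN g kl pl nl st.2.1.1 st.2.1.2.1 st.2.1.2.2 st.2.2.1 st.2.2.2.1 st.2.2.2.2 * g.na))

def pvRunB (carbs_g protein_g fats_g k_limit po4_limit na_limit : Int) : PvStB :=
  pvGroups.foldl (pvStepB k_limit po4_limit na_limit)
    ([], (carbs_g, protein_g, fats_g), (0, 0, 0))

def auto_renal_servings_alt (carbs_g : Int) (protein_g : Int) (fats_g : Int) (k_limit : Int) (po4_limit : Int) (na_limit : Int) : (List (String × Int)) × (List (String × Int)) :=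
  ((pvRunB carbs_g protein_g fats_g k_limit po4_limit na_limit).1,
   [("k", (pvRunB carbs_g protein_g fats_g k_limit po4_limit na_limit).2.2.1),
    ("po4", (pvRunB carbs_g protein_g fats_g k_limit po4_limit na_limit).2.2.2.1),
    ("na", (pvRunB carbs_g protein_g fats_g k_limit po4_limit na_limit).2.2.2.2)])

-- ===== PRECONDITION & SPEC =====
def Spec_auto_renal_servings (carbs_g : Int) (protein_g : Int) (fats_g : Int) (k_limit : Int) (po4_limit : Int) (na_limit : Int) (out : (List (String × Int)) × (List (String × Int))) : Prop := out = auto_renal_servings_alt carbs_g protein_g fats_g k_limit po4_limit na_limit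
instance (carbs_g : Int) (protein_g : Int) (fats_g : Int) (k_limit : Int) (po4_limit : Int) (na_limit : Int) (out : (List (String × Int)) × (List (String × Int))) : Decidable (Spec_auto_renal_servings carbs_g protein_g fats_g k_limit po4_limit na_limit out) := by unfold Spec_auto_renal_servings; infer_instance

-- ===== CLAIM (what is proved, stated in full; the proofs are below) =====
def Claim_equal_auto_renal_servings : Prop := ∀ (carbs_g : Int) (protein_g : Int) (fats_g : Int) (k_limit : Int) (po4_limit : Int) (na_limit : Int), Dom_auto_renal_servings carbs_g protein_g fats_g k_limit po4_limit na_limit → Spec_auto_renal_servings carbs_g protein_g fats_g k_limit po4_limit na_limit (auto_renal_servings carbs_g protein_g fats_g k_limit po4_limit na_limit)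

-- ===== LEMMAS AND PROOFS =====

-- How many servings A's inner loop actually adds, as its own recursion.
def pvCount (g : PvGroup) (kl pl nl : Int) : Nat → Int → Int → Int → Nat
  | 0, _, _, _ => 0
  | Nat.succ m, ek, ep, en =>
    if ek + g.k > kl ∨ ep + g.po4 > pl ∨ en + g.na > nl then 0
    else pvCount g kl pl nl m (ek + g.k) (ep + g.po4) (en + g.na) + 1

-- Proof-side clamp that also handles a zero-coefficient electrolyte whose budget is
-- already exceeded (A's break condition per serving); equals pvCap below the guard.
def pvStage (coeff lim used n : Int) : Int :=
  if coeff > 0 then min n (PySem.Int.floordiv (lim - used) coeff)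
  else if used > lim then 0 else n

-- All nutrient coefficients of a food group are nonnegative (true of every table entry).
def pvGood (g : PvGroup) : Prop :=
  0 ≤ g.carb ∧ 0 ≤ g.protein ∧ 0 ≤ g.fat ∧ 0 ≤ g.k ∧ 0 ≤ g.po4 ∧ 0 ≤ g.na

lemma pv_insert_insert_self (d : PySem.Dict String Int) (k : String) (v w : Int) :
    (d.insert k v).insert k w = d.insert k w := by
  apply PySem.Dict.ext
  by_cases hc : d.contains k
  · rw [PySem.Dict.items_insert_of_contains _ _ (by simp),
      PySem.Dict.items_insert_of_contains _ _ hc,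
      PySem.Dict.items_insert_of_contains _ _ hc, List.map_map]
    apply List.map_congr_left
    intro p _
    by_cases hpk : p.1 = k <;> simp [Function.comp, hpk]
  · rw [PySem.Dict.items_insert_of_contains _ _ (by simp),
      PySem.Dict.items_insert_of_not_contains _ _ (by simpa using hc),
      PySem.Dict.items_insert_of_not_contains _ _ (by simpa using hc), List.map_append]
    have hk : ∀ p ∈ d.items, p.1 ≠ k := by
      intro p hp hpk
      exact absurd ((PySem.Dict.contains_iff_mem_keys d k).mpr
        (hpk ▸ PySem.Dict.mem_keys_of_mem_items d hp)) hc
    have h1 : d.items.map (fun p => if p.1 == k then (k, w) else p) = d.items := by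
      apply (List.map_congr_left ?_).trans (List.map_id _)
      intro p hp
      simp [hk p hp]
    rw [h1]
    simp

lemma pvInnerA_eq (g : PvGroup) (kl pl nl : Int) : ∀ (m : Nat) (serv : PySem.Dict String Int)
    (mc mp mf ek ep en : Int),
    pvInnerA g kl pl nl m (serv, (mc, mp, mf), (ek, ep, en)) =
      ((if pvCount g kl pl nl m ek ep en = 0 then serv
        else serv.insert g.name (serv.getD g.name 0 + (pvCount g kl pl nl m ek ep en : Int))),
       (mc - (pvCount g kl pl nl m ek ep en : Int) * g.carb,
        mp - (pvCount g kl pl nl m ek ep en : Int) * g.protein,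
        mf - (pvCount g kl pl nl m ek ep en : Int) * g.fat),
       (ek + (pvCount g kl pl nl m ek ep en : Int) * g.k,
        ep + (pvCount g kl pl nl m ek ep en : Int) * g.po4,
        en + (pvCount g kl pl nl m ek ep en : Int) * g.na)) := by
  intro m
  induction m with
  | zero =>
    intro serv mc mp mf ek ep en
    simp [pvInnerA, pvCount]
  | succ m ih =>
    intro serv mc mp mf ek ep en
    simp only [pvInnerA, pvCount]
    by_cases hb : ek + g.k > kl ∨ ep + g.po4 > pl ∨ en + g.na > nl
    · rw [if_pos hb, if_pos hb]
      simp
    · rw [if_neg hb, if_neg hb, ih]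
      have hc1 : pvCount g kl pl nl m (ek + g.k) (ep + g.po4) (en + g.na) + 1 ≠ 0 :=
        Nat.succ_ne_zero _
      rw [if_neg hc1]
      by_cases h0 : pvCount g kl pl nl m (ek + g.k) (ep + g.po4) (en + g.na) = 0
      · rw [if_pos h0, h0]
        simp only [Prod.mk.injEq]
        refine ⟨rfl, ⟨by push_cast; ring, by push_cast; ring, by push_cast; ring⟩,
          by push_cast; ring, by push_cast; ring, by push_cast; ring⟩
      · rw [if_neg h0, PySem.Dict.getD_insert_self, pv_insert_insert_self]
        simp only [Prod.mk.injEq]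
        refine ⟨by push_cast; ring_nf, ⟨by push_cast; ring, by push_cast; ring, by push_cast; ring⟩,
          by push_cast; ring, by push_cast; ring, by push_cast; ring⟩

lemma pvStage_nonpos (coeff lim used n : Int) (_hc : 0 ≤ coeff) (hn : n ≤ 0) :
    pvStage coeff lim used n ≤ 0 := by
  unfold pvStage
  split_ifs <;> omega

lemma pvStage_blocked (coeff lim used : Int) (hc : 0 ≤ coeff) (hb : lim < used + coeff)
    (n : Int) : pvStage coeff lim used n ≤ 0 := by
  unfold pvStage
  split_ifs with h1 h2 <;> try omega
  have hlt : PySem.Int.floordiv (lim - used) coeff < 1 :=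
    (PySem.Int.floordiv_lt_iff_lt_mul h1).mpr (by omega)
  omega

lemma pvStage_succ (coeff lim used : Int) (hc : 0 ≤ coeff) (hb : used + coeff ≤ lim)
    (n : Int) : pvStage coeff lim used (n + 1) = pvStage coeff lim (used + coeff) n + 1 := by
  by_cases h1 : 0 < coeff
  · have hdiv : PySem.Int.floordiv (lim - (used + coeff)) coeff =
        PySem.Int.floordiv (lim - used) coeff - 1 := by
      rw [PySem.Int.floordiv_eq_ediv_of_pos h1, PySem.Int.floordiv_eq_ediv_of_pos h1,
        show lim - (used + coeff) = (lim - used) + (-1) * coeff by ring,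
        Int.add_mul_ediv_right _ _ (by omega : coeff ≠ 0)]
      ring
    unfold pvStage
    rw [if_pos h1, if_pos h1, hdiv]
    omega
  · unfold pvStage
    split_ifs <;> omega

lemma pvStage_nonneg (coeff lim used n : Int) (hc : 0 ≤ coeff) (hb : used + coeff ≤ lim)
    (hn : 0 ≤ n) : 0 ≤ pvStage coeff lim (used + coeff) n := by
  by_cases h1 : 0 < coeff
  · have hdiv : 0 ≤ PySem.Int.floordiv (lim - (used + coeff)) coeff :=
      (PySem.Int.le_floordiv_iff_mul_le h1).mpr (by omega)
    unfold pvStage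
    rw [if_pos h1]
    omega
  · unfold pvStage
    split_ifs <;> omega

lemma pvCount_eq_nat (g : PvGroup) (kl pl nl : Int) (hg : pvGood g) : ∀ (m : Nat) (ek ep en : Int),
    (pvCount g kl pl nl m ek ep en : Int) =
      max (pvStage g.na nl en (pvStage g.po4 pl ep (pvStage g.k kl ek (m : Int)))) 0 := by
  obtain ⟨hcb, hpr, hft, hk, hpo, hna⟩ := hg
  intro m
  induction m with
  | zero =>
    intro ek ep en
    have h1 : pvStage g.k kl ek ((0 : Nat) : Int) ≤ 0 := pvStage_nonpos g.k kl ek _ hk (by simp)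
    have h2 := pvStage_nonpos g.po4 pl ep _ hpo h1
    have h3 := pvStage_nonpos g.na nl en _ hna h2
    simp only [pvCount, Nat.cast_zero] at *
    omega
  | succ m ih =>
    intro ek ep en
    simp only [pvCount]
    by_cases hb : ek + g.k > kl ∨ ep + g.po4 > pl ∨ en + g.na > nl
    · rw [if_pos hb]
      rcases hb with hb | hb | hb
      · have h1 : pvStage g.k kl ek (((m + 1 : Nat)) : Int) ≤ 0 := pvStage_blocked g.k kl ek hk (by omega) _
        have h2 := pvStage_nonpos g.po4 pl ep _ hpo h1
        have h3 := pvStage_nonpos g.na nl en _ hna h2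
        simp only [Nat.cast_zero]
        omega
      · have h2 : pvStage g.po4 pl ep (pvStage g.k kl ek (((m + 1 : Nat)) : Int)) ≤ 0 :=
          pvStage_blocked g.po4 pl ep hpo (by omega) _
        have h3 := pvStage_nonpos g.na nl en _ hna h2
        simp only [Nat.cast_zero]
        omega
      · have h3 : pvStage g.na nl en
            (pvStage g.po4 pl ep (pvStage g.k kl ek (((m + 1 : Nat)) : Int))) ≤ 0 :=
          pvStage_blocked g.na nl en hna (by omega) _
        simp only [Nat.cast_zero]
        omega
    · rw [if_neg hb]
      simp only [not_or, not_lt] at hb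
      obtain ⟨hbk, hbp, hbn⟩ := hb
      have e1 : pvStage g.k kl ek ((m : Int) + 1) = pvStage g.k kl (ek + g.k) (m : Int) + 1 :=
        pvStage_succ g.k kl ek hk hbk _
      have ge1 : 0 ≤ pvStage g.k kl (ek + g.k) (m : Int) :=
        pvStage_nonneg g.k kl ek _ hk hbk (Int.natCast_nonneg m)
      have e2 : pvStage g.po4 pl ep (pvStage g.k kl (ek + g.k) (m : Int) + 1) =
          pvStage g.po4 pl (ep + g.po4) (pvStage g.k kl (ek + g.k) (m : Int)) + 1 :=
        pvStage_succ g.po4 pl ep hpo hbp _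
      have ge2 := pvStage_nonneg g.po4 pl ep _ hpo hbp ge1
      have e3 : pvStage g.na nl en
            (pvStage g.po4 pl (ep + g.po4) (pvStage g.k kl (ek + g.k) (m : Int)) + 1) =
          pvStage g.na nl (en + g.na)
            (pvStage g.po4 pl (ep + g.po4) (pvStage g.k kl (ek + g.k) (m : Int))) + 1 :=
        pvStage_succ g.na nl en hna hbn _
      have ge3 := pvStage_nonneg g.na nl en _ hna hbn ge2
      have hm1 : (((m + 1 : Nat)) : Int) = (m : Int) + 1 := by push_cast; ring
      rw [hm1, e1, e2, e3]
      push_cast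
      rw [ih]
      omega

-- Below a satisfied per-serving budget, the proof-side clamp is Source B's clamp.
lemma pvStage_eq_pvCap (coeff lim used n : Int) (hc : 0 ≤ coeff) (hb : used + coeff ≤ lim) :
    pvStage coeff lim used n = pvCap coeff lim used n := by
  unfold pvStage pvCap
  split_ifs <;> omega

-- A's serving count (via the pvStage formula) is Source B's guarded closed form pvN.
lemma pvCount_eq (g : PvGroup) (kl pl nl : Int) (hg : pvGood g) (mc mp mf ek ep en : Int) :
    (pvCount g kl pl nl (pvMaxServ g mc mp mf).toNat ek ep en : Int) =
      pvN g kl pl nl mc mp mf ek ep en := by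
  obtain ⟨hcb, hpr, hft, hk, hpo, hna⟩ := hg
  have hstage : (pvCount g kl pl nl (pvMaxServ g mc mp mf).toNat ek ep en : Int) =
      max (pvStage g.na nl en (pvStage g.po4 pl ep (pvStage g.k kl ek
        (pvMaxServ g mc mp mf)))) 0 := by
    by_cases hM' : 0 ≤ pvMaxServ g mc mp mf
    · rw [pvCount_eq_nat g kl pl nl ⟨hcb, hpr, hft, hk, hpo, hna⟩,
        Int.toNat_of_nonneg hM']
    · rw [Int.toNat_of_nonpos (by omega)]
      have h1 : pvStage g.k kl ek (pvMaxServ g mc mp mf) ≤ 0 :=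
        pvStage_nonpos g.k kl ek _ hk (by omega)
      have h2 := pvStage_nonpos g.po4 pl ep _ hpo h1
      have h3 := pvStage_nonpos g.na nl en _ hna h2
      simp only [pvCount, Nat.cast_zero]
      omega
  rw [hstage]
  unfold pvN
  by_cases hfit : ek + g.k ≤ kl ∧ ep + g.po4 ≤ pl ∧ en + g.na ≤ nl
  · rw [if_pos hfit,
      pvStage_eq_pvCap g.k kl ek _ hk hfit.1, pvStage_eq_pvCap g.po4 pl ep _ hpo hfit.2.1,
      pvStage_eq_pvCap g.na nl en _ hna hfit.2.2]
  · rw [if_neg hfit]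
    simp only [not_and_or, not_le] at hfit
    rcases hfit with hb | hb | hb
    · have h1 : pvStage g.k kl ek (pvMaxServ g mc mp mf) ≤ 0 :=
        pvStage_blocked g.k kl ek hk (by omega) _
      have h2 := pvStage_nonpos g.po4 pl ep _ hpo h1
      have h3 := pvStage_nonpos g.na nl en _ hna h2
      omega
    · have h2 : pvStage g.po4 pl ep (pvStage g.k kl ek (pvMaxServ g mc mp mf)) ≤ 0 :=
        pvStage_blocked g.po4 pl ep hpo (by omega) _
      have h3 := pvStage_nonpos g.na nl en _ hna h2
      omega
    · have h3 : pvStage g.na nl en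
          (pvStage g.po4 pl ep (pvStage g.k kl ek (pvMaxServ g mc mp mf))) ≤ 0 :=
        pvStage_blocked g.na nl en hna (by omega) _
      omega

lemma pvFold_eq (kl pl nl : Int) : ∀ (gs : List PvGroup), (∀ g ∈ gs, pvGood g) →
    ∀ (d : PySem.Dict String Int) (acc : List (String × Int)) (mac elec : Int × Int × Int),
    d.items = acc ++ gs.map (fun g => (g.name, (0 : Int))) →
    (d.items.map Prod.fst).Nodup →
    (gs.foldl (pvStepA kl pl nl) (d, mac, elec)).1.items =
      (gs.foldl (pvStepB kl pl nl) (acc, mac, elec)).1 ∧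
    (gs.foldl (pvStepA kl pl nl) (d, mac, elec)).2 =
      (gs.foldl (pvStepB kl pl nl) (acc, mac, elec)).2 := by
  intro gs
  induction gs with
  | nil =>
    intro _ d acc mac elec hitems _
    exact ⟨by simpa using hitems, rfl⟩
  | cons g gs IH =>
    intro hGood d acc mac elec hitems hnodup
    obtain ⟨mc, mp, mf⟩ := mac
    obtain ⟨ek, ep, en⟩ := elec
    have hg : pvGood g := hGood g (List.mem_cons_self ..)
    have hcN : (pvCount g kl pl nl (pvMaxServ g mc mp mf).toNat ek ep en : Int) =
        pvN g kl pl nl mc mp mf ek ep en :=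
      pvCount_eq g kl pl nl hg mc mp mf ek ep en
    have hA : pvStepA kl pl nl (d, (mc, mp, mf), (ek, ep, en)) g =
        ((if pvCount g kl pl nl (pvMaxServ g mc mp mf).toNat ek ep en = 0 then d
          else d.insert g.name (d.getD g.name 0 + pvN g kl pl nl mc mp mf ek ep en)),
         (mc - pvN g kl pl nl mc mp mf ek ep en * g.carb,
          mp - pvN g kl pl nl mc mp mf ek ep en * g.protein,
          mf - pvN g kl pl nl mc mp mf ek ep en * g.fat),
         (ek + pvN g kl pl nl mc mp mf ek ep en * g.k,
          ep + pvN g kl pl nl mc mp mf ek ep en * g.po4,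
          en + pvN g kl pl nl mc mp mf ek ep en * g.na)) := by
      show pvInnerA g kl pl nl (pvMaxServ g mc mp mf).toNat (d, (mc, mp, mf), (ek, ep, en)) = _
      rw [pvInnerA_eq g kl pl nl (pvMaxServ g mc mp mf).toNat d mc mp mf ek ep en, hcN]
    have hB : pvStepB kl pl nl (acc, (mc, mp, mf), (ek, ep, en)) g =
        (acc ++ [(g.name, pvN g kl pl nl mc mp mf ek ep en)],
         (mc - pvN g kl pl nl mc mp mf ek ep en * g.carb,
          mp - pvN g kl pl nl mc mp mf ek ep en * g.protein,
          mf - pvN g kl pl nl mc mp mf ek ep en * g.fat),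
         (ek + pvN g kl pl nl mc mp mf ek ep en * g.k,
          ep + pvN g kl pl nl mc mp mf ek ep en * g.po4,
          en + pvN g kl pl nl mc mp mf ek ep en * g.na)) := rfl
    simp only [List.foldl_cons]
    rw [hA, hB]
    have hname0 : (g.name, (0 : Int)) ∈ d.items := by rw [hitems]; simp
    have hkeys : d.keys.Nodup := by simpa [PySem.Dict.keys] using hnodup
    have hgetD : d.getD g.name 0 = 0 := PySem.Dict.getD_of_mem_items d hname0 hkeys 0
    have hnd' : ((acc ++ (g.name, (0 : Int)) :: gs.map (fun g' => (g'.name, (0 : Int)))).map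
        Prod.fst).Nodup := hitems ▸ hnodup
    rw [List.map_append, List.map_cons] at hnd'
    have hnotacc : ∀ p ∈ acc, p.1 ≠ g.name := by
      intro p hp hpk
      have hdisj := (List.nodup_append.mp hnd').2.2
      exact hdisj p.1 (List.mem_map.mpr ⟨p, hp, rfl⟩) g.name (List.mem_cons_self ..) hpk
    have hnotrest : ∀ p ∈ gs.map (fun g' => (g'.name, (0 : Int))), p.1 ≠ g.name := by
      intro p hp hpk
      have h2 := (List.nodup_append.mp hnd').2.1
      rw [List.nodup_cons] at h2
      exact h2.1 (by rw [← hpk]; exact List.mem_map.mpr ⟨p, hp, rfl⟩)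
    have hitems' : (if pvCount g kl pl nl (pvMaxServ g mc mp mf).toNat ek ep en = 0 then d
          else d.insert g.name (d.getD g.name 0 + pvN g kl pl nl mc mp mf ek ep en)).items
        = (acc ++ [(g.name, pvN g kl pl nl mc mp mf ek ep en)]) ++
            gs.map (fun g' => (g'.name, (0 : Int))) := by
      by_cases h0 : pvCount g kl pl nl (pvMaxServ g mc mp mf).toNat ek ep en = 0
      · rw [if_pos h0]
        have hN0 : pvN g kl pl nl mc mp mf ek ep en = 0 := by
          rw [← hcN, h0]; simp
        rw [hitems, hN0]
        simp
      · rw [if_neg h0, hgetD, zero_add]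
        have hcont : d.contains g.name = true := by
          rw [PySem.Dict.contains_iff_mem_keys d g.name]
          simp only [PySem.Dict.keys]
          rw [hitems]
          simp
        rw [PySem.Dict.items_insert_of_contains _ _ hcont, hitems]
        have hmacc : acc.map (fun p => if p.1 == g.name then
            (g.name, pvN g kl pl nl mc mp mf ek ep en) else p) = acc := by
          apply (List.map_congr_left ?_).trans (List.map_id _)
          intro p hp
          simp [hnotacc p hp]
        have hmrest : (gs.map (fun g' => (g'.name, (0 : Int)))).map (fun p =>
            if p.1 == g.name then (g.name, pvN g kl pl nl mc mp mf ek ep en) else p) =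
            gs.map (fun g' => (g'.name, (0 : Int))) := by
          apply (List.map_congr_left ?_).trans (List.map_id _)
          intro p hp
          simp [hnotrest p hp]
        simp only [List.map_append, List.map_cons, hmacc, hmrest]
        simp
    have hnodup' : ((if pvCount g kl pl nl (pvMaxServ g mc mp mf).toNat ek ep en = 0 then d
          else d.insert g.name (d.getD g.name 0 + pvN g kl pl nl mc mp mf ek ep en)).items.map
            Prod.fst).Nodup := by
      rw [hitems']
      rw [hitems] at hnodup
      simpa using hnodup
    exact IH (fun g' hg' => hGood g' (List.mem_cons_of_mem _ hg')) _ _ _ _ hitems' hnodup'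

-- ===== VERDICT (by name: the statement is the Claim_ definition above) =====
set_option maxHeartbeats 1000000 in
theorem auto_renal_servings_spec : Claim_equal_auto_renal_servings := by
  intro carbs_g protein_g fats_g k_limit po4_limit na_limit _
  unfold Spec_auto_renal_servings auto_renal_servings auto_renal_servings_alt
  have hAll : ∀ g ∈ pvGroups, pvGood g := by
    intro g hgm
    fin_cases hgm <;>
      exact ⟨by norm_num, by norm_num, by norm_num, by norm_num, by norm_num, by norm_num⟩
  have h := pvFold_eq k_limit po4_limit na_limit pvGroups hAll
    (pvGroups.foldl (fun d g => d.insert g.name 0) PySem.Dict.empty) []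
    (carbs_g, protein_g, fats_g) (0, 0, 0) (by decide) (by decide)
  unfold pvRunA pvRunB
  rw [h.1, h.2]
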